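-- pv_equiv track=rewrite | github.com/ameirem/TP_indexation_web | Ranking/query_processor.py | filter_documents
-- ===== SOURCE A (Python) =====
-- def filter_documents(tokens, index, operator="AND"):
--     """
--     Filtrer les documents en fonction des tokens de la requête.
--
--     Args:
--         tokens (list): Liste des tokens de la requête.
--         index (dict): Index des tokens dans les documents.
--         operator (str): L'opérateur de recherche (AND ou OR).
--
--     Returns:
--         dict: Dictionnaire des documents filtrés avec leurs comptes de tokens.
--     """
--     filtered_documents = {}
--
--     if operator.upper() == "OR":
--         # Si l'opérateur est OR, ajouter les documents contenant au moins un des tokens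
--         for token in tokens:
--             if token in index:
--                 for doc_id, doc_info in index[token].items():
--                     if doc_id not in filtered_documents:
--                         filtered_documents[doc_id] = doc_info["count"]
--                     else:
--                         filtered_documents[doc_id] += doc_info["count"]
--
--     elif operator.upper() == "AND":
--         # Si l'opérateur est AND, ajouter les documents contenant tous les tokens
--         documents_sets = [set(index[token].keys()) for token in tokens if token in index]
--
--         if documents_sets:
--             common_documents = set.intersection(*documents_sets)
--             for doc_id in common_documents:
--                 total_count = sum(index[token][doc_id]["count"] for token in tokens if doc_id in index[token])
--                 filtered_documents[doc_id] = total_count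
--
--     return filtered_documents
-- ===== SOURCE B (Python) =====
-- def filter_documents(tokens, index, operator="AND"):
--     op = operator.upper()
--     if op not in ("AND", "OR"):
--         return {}
--     counts = {}
--     seen = {}
--     for token in tokens:
--         if token in index:
--             for doc_id, doc_info in index[token].items():
--                 counts[doc_id] = counts.get(doc_id, 0) + doc_info["count"]
--                 seen.setdefault(doc_id, set()).add(token)
--     if op == "OR":
--         return counts
--     needed = len({t for t in tokens if t in index})
--     return {doc: c for doc, c in counts.items() if len(seen[doc]) == needed}
-- ===== Notes on version B (the rewrite author's own statement) =====
-- stated objective: alternative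
-- what changed: A builds per-token key sets, intersects them and then re-scans all tokens to re-sum each common document's counts; B makes one accumulation pass over the posting lists, tallying counts and the set of distinct query tokens seen per document, and for AND keeps the documents whose distinct-token tally equals the number of distinct indexed query tokens.
-- outside the precondition, e.g. on filter_documents(['a', 'b'], {'a': {'d': {'count': 1}}}, 'AND'): A raises KeyError, B returns {'d': 1}
import Mathlib
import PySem

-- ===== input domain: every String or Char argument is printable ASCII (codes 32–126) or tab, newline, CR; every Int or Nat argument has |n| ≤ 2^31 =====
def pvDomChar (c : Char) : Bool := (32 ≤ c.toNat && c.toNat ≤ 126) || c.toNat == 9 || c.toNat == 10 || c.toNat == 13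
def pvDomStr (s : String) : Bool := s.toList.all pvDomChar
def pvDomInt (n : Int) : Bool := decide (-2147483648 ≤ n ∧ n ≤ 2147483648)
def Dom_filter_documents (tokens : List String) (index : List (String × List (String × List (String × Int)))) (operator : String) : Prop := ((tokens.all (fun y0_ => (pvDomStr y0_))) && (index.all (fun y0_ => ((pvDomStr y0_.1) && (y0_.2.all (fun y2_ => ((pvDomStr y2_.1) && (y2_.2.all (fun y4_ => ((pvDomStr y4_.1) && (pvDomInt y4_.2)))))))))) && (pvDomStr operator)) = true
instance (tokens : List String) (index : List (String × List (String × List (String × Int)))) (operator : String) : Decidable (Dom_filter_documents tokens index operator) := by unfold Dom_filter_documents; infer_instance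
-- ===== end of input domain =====

-- B replaces A's build-sets/intersect/re-sum AND strategy by a single accumulation pass over the
-- posting lists (per-document count tally + distinct-token tally); objective: alternative algorithm.

-- ===== PORT A =====
-- doc_info["count"]  (Python raises KeyError when absent; Pre_ excludes those inputs)
def pvCount (info : List (String × Int)) : Int :=
  PySem.Dict.getD (PySem.Dict.mk info) "count" 0

-- sum(index[token][doc_id]["count"] for token in tokens if doc_id in index[token])
-- (the 'none' branch is where Python raises KeyError on index[token]; Pre_ excludes reaching it)
def pvTotalA (tokens : List String) (index : List (String × List (String × List (String × Int)))) (doc : String) : Int :=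
  tokens.foldl (fun acc t =>
    match PySem.Dict.get? (PySem.Dict.mk index) t with
    | none => acc
    | some d =>
        if PySem.Dict.contains (PySem.Dict.mk d) doc then
          acc + pvCount (PySem.Dict.getD (PySem.Dict.mk d) doc [])
        else acc) 0

def filter_documents (tokens : List String) (index : List (String × List (String × List (String × Int)))) (operator : String) : List (String × Int) :=
  if PySem.Str.upper operator = "OR" then
    (tokens.foldl (fun fd t =>
        match PySem.Dict.get? (PySem.Dict.mk index) t with
        | none => fd
        | some d =>
            d.foldl (fun fd (p : String × List (String × Int)) =>
              if fd.contains p.1 = false then fd.insert p.1 (pvCount p.2)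
              else fd.insert p.1 (fd.getD p.1 0 + pvCount p.2)) fd)
      PySem.Dict.empty).items
  else if PySem.Str.upper operator = "AND" then
    let sets : List (PySem.Set String) :=
      tokens.filterMap (fun t =>
        (PySem.Dict.get? (PySem.Dict.mk index) t).map (fun d => PySem.Set.ofList (PySem.Dict.keys (PySem.Dict.mk d))))
    match sets with
    | [] => []
    | s :: rest =>
        let common := rest.foldl (fun a b => PySem.Set.inter a b) s
        (common.foldl (fun fd doc => fd.insert doc (pvTotalA tokens index doc)) PySem.Dict.empty).items
  else []

-- ===== PORT B =====
def filter_documents_alt (tokens : List String) (index : List (String × List (String × List (String × Int)))) (operator : String) : List (String × Int) :=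
  let op := PySem.Str.upper operator
  if ¬(op = "AND" ∨ op = "OR") then []
  else
    -- one pass: per-document count tally and per-document set of distinct query tokens seen
    let st := tokens.foldl
      (fun (st : PySem.Dict String Int × PySem.Dict String (PySem.Set String)) t =>
        match PySem.Dict.get? (PySem.Dict.mk index) t with
        | none => st
        | some d =>
            d.foldl (fun st (p : String × List (String × Int)) =>
              (st.1.insert p.1 (st.1.getD p.1 0 + pvCount p.2),
               st.2.insert p.1 (PySem.Set.add (st.2.getD p.1 PySem.Set.empty) t))) st)
      (PySem.Dict.empty, PySem.Dict.empty)
    if op = "OR" then st.1.items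
    else
      let needed := PySem.Set.len (PySem.Set.ofList (tokens.filter (fun t => PySem.Dict.contains (PySem.Dict.mk index) t)))
      st.1.items.filter (fun p => PySem.Set.len (st.2.getD p.1 PySem.Set.empty) == needed)

-- ===== PRECONDITION & SPEC =====
-- Pre_ excludes, for AND/OR queries only, (a) posting lists with duplicate doc ids under a queried
-- token — no Python dict has duplicate keys, so they represent no Python input; (b) inputs where
-- Python A raises KeyError:
-- a posting of an indexed query token without a "count" entry (A reads it in OR and for common docs
-- in AND; B reads every such posting, see cites), and AND queries that mix an unindexed token with a
-- nonempty intersection (A evaluates index[token] for every token while re-summing).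
def Pre_filter_documents (tokens : List String) (index : List (String × List (String × List (String × Int)))) (operator : String) : Prop :=
  ((PySem.Str.upper operator = "AND" ∨ PySem.Str.upper operator = "OR") →
    (∀ t ∈ tokens, (PySem.Dict.keys (PySem.Dict.mk ((PySem.Dict.get? (PySem.Dict.mk index) t).getD []))).Nodup) ∧
    (∀ t ∈ tokens, ∀ p ∈ (PySem.Dict.get? (PySem.Dict.mk index) t).getD [],
      PySem.Dict.contains (PySem.Dict.mk p.2) "count" = true)) ∧
  ¬(PySem.Str.upper operator = "AND" ∧
    (∃ t ∈ tokens, PySem.Dict.contains (PySem.Dict.mk index) t = false) ∧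
    (∃ t ∈ tokens, ∃ p ∈ (PySem.Dict.get? (PySem.Dict.mk index) t).getD [],
      ∀ t' ∈ tokens, PySem.Dict.contains (PySem.Dict.mk index) t' = true →
        PySem.Dict.contains (PySem.Dict.mk ((PySem.Dict.get? (PySem.Dict.mk index) t').getD [])) p.1 = true))

instance (tokens : List String) (index : List (String × List (String × List (String × Int)))) (operator : String) : Decidable (Pre_filter_documents tokens index operator) := by
  unfold Pre_filter_documents; infer_instance

def pvWitness_filter_documents : List String × (List (String × List (String × List (String × Int)))) × String :=
  (["a", "b"], [("a", [("d", [("count", 2)]), ("e", [("count", 1)])]), ("b", [("d", [("count", 5)])])], "AND")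

def Spec_filter_documents (tokens : List String) (index : List (String × List (String × List (String × Int)))) (operator : String) (out : List (String × Int)) : Prop := out = filter_documents_alt tokens index operator
instance (tokens : List String) (index : List (String × List (String × List (String × Int)))) (operator : String) (out : List (String × Int)) : Decidable (Spec_filter_documents tokens index operator out) := by unfold Spec_filter_documents; infer_instance

-- ===== CLAIM (what is proved, stated in full; the proofs are below) =====
def Claim_equal_filter_documents : Prop := ∀ (tokens : List String) (index : List (String × List (String × List (String × Int)))) (operator : String), Dom_filter_documents tokens index operator → Pre_filter_documents tokens index operator → Spec_filter_documents tokens index operator (filter_documents tokens index operator)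

-- ===== LEMMAS AND PROOFS =====

-- the posting dicts of the indexed query tokens, in occurrence order (duplicates kept)
def pvD (tokens : List String) (index : List (String × List (String × List (String × Int)))) : List (List (String × List (String × Int))) :=
  tokens.filterMap (fun t => PySem.Dict.get? (PySem.Dict.mk index) t)

def pvCStep (index : List (String × List (String × List (String × Int)))) (c : PySem.Dict String Int) (t : String) : PySem.Dict String Int :=
  match PySem.Dict.get? (PySem.Dict.mk index) t with
  | none => c
  | some d => d.foldl (fun c p => c.insert p.1 (c.getD p.1 0 + pvCount p.2)) c

def pvSStep (index : List (String × List (String × List (String × Int)))) (s : PySem.Dict String (PySem.Set String)) (t : String) : PySem.Dict String (PySem.Set String) :=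
  match PySem.Dict.get? (PySem.Dict.mk index) t with
  | none => s
  | some d => d.foldl (fun s p => s.insert p.1 (PySem.Set.add (s.getD p.1 PySem.Set.empty) t)) s

def pvHas (index : List (String × List (String × List (String × Int)))) (doc : String) (t : String) : Bool :=
  match PySem.Dict.get? (PySem.Dict.mk index) t with
  | none => false
  | some d => d.any (fun p => p.1 == doc)

def pvSumMatch (d : List (String × List (String × Int))) (doc : String) : Int :=
  ((d.filter (fun p => p.1 == doc)).map (fun p => pvCount p.2)).sum

theorem pv_split (tokens : List String) (index : List (String × List (String × List (String × Int)))) :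
    tokens.foldl
      (fun (st : PySem.Dict String Int × PySem.Dict String (PySem.Set String)) t =>
        match PySem.Dict.get? (PySem.Dict.mk index) t with
        | none => st
        | some d =>
            d.foldl (fun st (p : String × List (String × Int)) =>
              (st.1.insert p.1 (st.1.getD p.1 0 + pvCount p.2),
               st.2.insert p.1 (PySem.Set.add (st.2.getD p.1 PySem.Set.empty) t))) st)
      (PySem.Dict.empty, PySem.Dict.empty)
    = (tokens.foldl (pvCStep index) PySem.Dict.empty, tokens.foldl (pvSStep index) PySem.Dict.empty) := by
  have h : (fun (st : PySem.Dict String Int × PySem.Dict String (PySem.Set String)) t =>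
        match PySem.Dict.get? (PySem.Dict.mk index) t with
        | none => st
        | some d =>
            d.foldl (fun st (p : String × List (String × Int)) =>
              (st.1.insert p.1 (st.1.getD p.1 0 + pvCount p.2),
               st.2.insert p.1 (PySem.Set.add (st.2.getD p.1 PySem.Set.empty) t))) st)
      = (fun st t => (pvCStep index st.1 t, pvSStep index st.2 t)) := by
    funext st t
    obtain ⟨c, s⟩ := st
    cases hg : PySem.Dict.get? (PySem.Dict.mk index) t with
    | none => simp [pvCStep, pvSStep, hg]
    | some d =>
        simp only [pvCStep, pvSStep, hg]
        exact PySem.List.foldl_prod_mk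
          (f := fun c (p : String × List (String × Int)) => c.insert p.1 (c.getD p.1 0 + pvCount p.2))
          (g := fun s (p : String × List (String × Int)) => s.insert p.1 (PySem.Set.add (s.getD p.1 PySem.Set.empty) t))
          d c s
  rw [h, PySem.List.foldl_prod_mk]

theorem pv_or_eq (tokens : List String) (index : List (String × List (String × List (String × Int)))) (fd : PySem.Dict String Int) :
    tokens.foldl (fun fd t =>
        match PySem.Dict.get? (PySem.Dict.mk index) t with
        | none => fd
        | some d =>
            d.foldl (fun fd (p : String × List (String × Int)) =>
              if fd.contains p.1 = false then fd.insert p.1 (pvCount p.2)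
              else fd.insert p.1 (fd.getD p.1 0 + pvCount p.2)) fd) fd
    = tokens.foldl (pvCStep index) fd := by
  apply PySem.List.foldl_congr_mem
  intro acc t _
  cases hg : PySem.Dict.get? (PySem.Dict.mk index) t with
  | none => simp [pvCStep, hg]
  | some d =>
      simp only [pvCStep, hg]
      apply PySem.List.foldl_congr_mem
      intro c p _
      by_cases hc : c.contains p.1 = false
      · rw [if_pos hc, PySem.Dict.getD_of_not_contains _ _ hc, zero_add]
      · rw [if_neg hc]

theorem pv_keys (tokens : List String) (index : List (String × List (String × List (String × Int)))) (c : PySem.Dict String Int) :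
    (tokens.foldl (pvCStep index) c).keys
      = PySem.Set.update c.keys ((pvD tokens index).flatMap (fun d => (PySem.Dict.mk d).keys)) := by
  induction tokens generalizing c with
  | nil => simp [pvD, PySem.Set.update]
  | cons t ts ih =>
    cases hg : PySem.Dict.get? (PySem.Dict.mk index) t with
    | none =>
      have hD : pvD (t :: ts) index = pvD ts index := by
        simp [pvD, hg]
      have hstep : pvCStep index c t = c := by simp [pvCStep, hg]
      rw [List.foldl_cons, hstep, hD, ih]
    | some d =>
      have hD : pvD (t :: ts) index = d :: pvD ts index := by
        simp [pvD, hg]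
      have hstep : pvCStep index c t
          = d.foldl (fun c p => c.insert p.1 (c.getD p.1 0 + pvCount p.2)) c := by
        simp [pvCStep, hg]
      rw [List.foldl_cons, hstep, ih, hD,
        PySem.Dict.keys_foldl_insert_key d (fun p => p.1) (fun c p => c.getD p.1 0 + pvCount p.2) c]
      simp [PySem.Set.update, PySem.Dict.keys_mk, List.foldl_append]

theorem pv_nodup (tokens : List String) (index : List (String × List (String × List (String × Int)))) (c : PySem.Dict String Int) :
    c.keys.Nodup → (tokens.foldl (pvCStep index) c).keys.Nodup := by
  induction tokens generalizing c with
  | nil => intro h; exact h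
  | cons t ts ih =>
    intro h
    rw [List.foldl_cons]
    apply ih
    cases hg : PySem.Dict.get? (PySem.Dict.mk index) t with
    | none => simpa [pvCStep, hg] using h
    | some d =>
      have hstep : pvCStep index c t
          = d.foldl (fun c p => c.insert p.1 (c.getD p.1 0 + pvCount p.2)) c := by
        simp [pvCStep, hg]
      rw [hstep]
      exact PySem.Dict.nodup_keys_foldl_insert_key d (fun p => p.1) _ c h

theorem pv_getD_inner (d : List (String × List (String × Int))) (c : PySem.Dict String Int) (doc : String) :
    (d.foldl (fun c p => c.insert p.1 (c.getD p.1 0 + pvCount p.2)) c).getD doc 0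
      = c.getD doc 0 + pvSumMatch d doc := by
  induction d generalizing c with
  | nil => simp [pvSumMatch]
  | cons p d ih =>
    rw [List.foldl_cons, ih]
    by_cases hp : doc = p.1
    · subst hp
      rw [PySem.Dict.getD_insert]
      simp [pvSumMatch]
      ring
    · have hb : (p.1 == doc) = false := by simp [Ne.symm hp]
      rw [PySem.Dict.getD_insert, if_neg hp]
      simp [pvSumMatch, hb]

theorem pv_getD (tokens : List String) (index : List (String × List (String × List (String × Int)))) (c : PySem.Dict String Int) (doc : String) :
    (tokens.foldl (pvCStep index) c).getD doc 0
      = c.getD doc 0 + ((pvD tokens index).map (fun d => pvSumMatch d doc)).sum := by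
  induction tokens generalizing c with
  | nil => simp [pvD]
  | cons t ts ih =>
    cases hg : PySem.Dict.get? (PySem.Dict.mk index) t with
    | none =>
      have hD : pvD (t :: ts) index = pvD ts index := by
        simp [pvD, hg]
      have hstep : pvCStep index c t = c := by simp [pvCStep, hg]
      rw [List.foldl_cons, hstep, hD, ih]
    | some d =>
      have hD : pvD (t :: ts) index = d :: pvD ts index := by
        simp [pvD, hg]
      have hstep : pvCStep index c t
          = d.foldl (fun c p => c.insert p.1 (c.getD p.1 0 + pvCount p.2)) c := by
        simp [pvCStep, hg]
      rw [List.foldl_cons, hstep, ih, pv_getD_inner, hD]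
      simp [add_assoc]

theorem pv_seen_inner (d : List (String × List (String × Int))) (s : PySem.Dict String (PySem.Set String)) (t doc : String) :
    (d.foldl (fun s p => s.insert p.1 (PySem.Set.add (s.getD p.1 PySem.Set.empty) t)) s).getD doc PySem.Set.empty
      = if d.any (fun p => p.1 == doc) then PySem.Set.add (s.getD doc PySem.Set.empty) t
        else s.getD doc PySem.Set.empty := by
  induction d generalizing s with
  | nil => simp
  | cons p d ih =>
    rw [List.foldl_cons, ih, List.any_cons]
    by_cases hp : doc = p.1
    · subst hp
      rw [PySem.Dict.getD_insert]
      simp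
    · have hb : (p.1 == doc) = false := by simp [Ne.symm hp]
      rw [PySem.Dict.getD_insert, if_neg hp, hb, Bool.false_or]

theorem pv_seen (tokens : List String) (index : List (String × List (String × List (String × Int)))) (s : PySem.Dict String (PySem.Set String)) (doc : String) :
    (tokens.foldl (pvSStep index) s).getD doc PySem.Set.empty
      = PySem.Set.update (s.getD doc PySem.Set.empty) (tokens.filter (pvHas index doc)) := by
  induction tokens generalizing s with
  | nil => simp [PySem.Set.update]
  | cons t ts ih =>
    cases hg : PySem.Dict.get? (PySem.Dict.mk index) t with
    | none =>
      have hstep : pvSStep index s t = s := by simp [pvSStep, hg]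
      have hh : pvHas index doc t = false := by simp [pvHas, hg]
      rw [List.foldl_cons, hstep, ih, List.filter_cons, hh]
      simp
    | some d =>
      have hstep : pvSStep index s t
          = d.foldl (fun s p => s.insert p.1 (PySem.Set.add (s.getD p.1 PySem.Set.empty) t)) s := by
        simp [pvSStep, hg]
      have hh : pvHas index doc t = d.any (fun p => p.1 == doc) := by simp [pvHas, hg]
      rw [List.foldl_cons, hstep, ih, pv_seen_inner, List.filter_cons, hh]
      cases hany : d.any (fun p => p.1 == doc) with
      | false => simp
      | true => simp [PySem.Set.update]

theorem pv_add_filter (s : PySem.Set String) (x : String) (p : String → Bool) :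
    (PySem.Set.add s x).filter p
      = if p x then PySem.Set.add (s.filter p) x else s.filter p := by
  by_cases hc : x ∈ s <;> by_cases hp : p x = true <;>
    simp [PySem.Set.add, PySem.Set.contains, hc, hp, List.mem_filter, List.filter_append]

theorem pv_ofList_filter (p : String → Bool) (l : List String) :
    PySem.Set.ofList (l.filter p) = (PySem.Set.ofList l).filter p := by
  suffices h : ∀ (l : List String) (s : PySem.Set String),
      (l.filter p).foldl PySem.Set.add (s.filter p) = (l.foldl PySem.Set.add s).filter p by
    simpa [PySem.Set.ofList, PySem.Set.empty] using h l []
  intro l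
  induction l with
  | nil => intro s; rfl
  | cons x l ih =>
    intro s
    by_cases hp : p x = true
    · rw [List.filter_cons, if_pos hp, List.foldl_cons, List.foldl_cons,
        show PySem.Set.add (List.filter p s) x = (PySem.Set.add s x).filter p from by
          rw [pv_add_filter, if_pos hp]]
      exact ih (PySem.Set.add s x)
    · rw [List.filter_cons, if_neg hp, List.foldl_cons,
        show List.filter p s = (PySem.Set.add s x).filter p from by
          rw [pv_add_filter, if_neg hp]]
      exact ih (PySem.Set.add s x)

theorem pv_foldl_add_nodup (l : List String) : ∀ (s : List String), (s ++ l).Nodup →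
    l.foldl PySem.Set.add s = s ++ l := by
  induction l with
  | nil => intro s _; simp
  | cons x l ih =>
    intro s h
    have hx : x ∉ s := by
      intro hxs
      exact (List.disjoint_of_nodup_append h) hxs (List.mem_cons_self)
    have hadd : PySem.Set.add s x = s ++ [x] := by
      simp [PySem.Set.add, hx]
    have h' : ((s ++ [x]) ++ l).Nodup := by simpa using h
    rw [List.foldl_cons, hadd, ih (s ++ [x]) h']
    simp

theorem pv_ofList_nodup (l : List String) (h : l.Nodup) : PySem.Set.ofList l = l := by
  have := pv_foldl_add_nodup l [] (by simpa using h)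
  simpa [PySem.Set.ofList, PySem.Set.empty] using this

theorem pv_update_filter (m : List String) : ∀ (s : PySem.Set String) (p : String → Bool),
    (∀ x, p x = true → x ∈ s) → (PySem.Set.update s m).filter p = s.filter p := by
  induction m with
  | nil => intro s p _; rfl
  | cons x m ih =>
    intro s p h
    have h' : ∀ y, p y = true → y ∈ PySem.Set.add s x := by
      intro y hy
      exact (PySem.Set.mem_add s x y).mpr (Or.inl (h y hy))
    have hupd : PySem.Set.update s (x :: m) = PySem.Set.update (PySem.Set.add s x) m := by
      simp [PySem.Set.update]
    rw [hupd, ih _ p h', pv_add_filter]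
    by_cases hp : p x = true
    · have hx : x ∈ List.filter p s := List.mem_filter.mpr ⟨h x hp, hp⟩
      simp [hp, PySem.Set.add, hx]
    · simp [hp]

theorem pv_common (rest : List (PySem.Set String)) : ∀ (s : PySem.Set String),
    rest.foldl (fun a b => PySem.Set.inter a b) s
      = s.filter (fun x => rest.all (fun t => PySem.Set.contains t x)) := by
  induction rest with
  | nil => intro s; simp
  | cons r rest ih =>
    intro s
    rw [List.foldl_cons, ih]
    rw [show PySem.Set.inter s r = s.filter (fun x => PySem.Set.contains r x) from rfl,
      List.filter_filter]
    apply List.filter_congr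
    intro x _
    rw [List.all_cons]
    cases hr : PySem.Set.contains r x <;> simp [hr]

theorem pv_sumMatch_nodup (d : List (String × List (String × Int))) (doc : String)
    (h : ((PySem.Dict.mk d).keys).Nodup) :
    pvSumMatch d doc
      = if PySem.Dict.contains (PySem.Dict.mk d) doc then pvCount (PySem.Dict.getD (PySem.Dict.mk d) doc []) else 0 := by
  induction d with
  | nil => simp [pvSumMatch, PySem.Dict.contains_mk]
  | cons p d ih =>
    obtain ⟨k, v⟩ := p
    rw [PySem.Dict.keys_mk, List.map_cons, List.nodup_cons] at h
    obtain ⟨hp1, hnd⟩ := h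
    by_cases hd : k = doc
    · subst hd
      have hcontains : PySem.Dict.contains (PySem.Dict.mk (((k, v) :: d) : List (String × List (String × Int)))) k = true := by
        simp [PySem.Dict.contains_mk]
      have hget : PySem.Dict.getD (PySem.Dict.mk (((k, v) :: d) : List (String × List (String × Int)))) k [] = v := by
        simp [PySem.Dict.getD, PySem.Dict.get?_mk_cons]
      have hrest : pvSumMatch d k = 0 := by
        have hfil : d.filter (fun q => q.1 == k) = [] := by
          rw [List.filter_eq_nil_iff]
          intro q hq
          simp only [beq_iff_eq]
          intro hq1
          have hm := List.mem_map_of_mem (f := fun x => x.1) hq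
          exact absurd (by simpa [hq1] using hm) (by simpa using hp1)
        simp [pvSumMatch, hfil]
      have hcons : pvSumMatch ((k, v) :: d) k = pvCount v + pvSumMatch d k := by
        simp [pvSumMatch]
      rw [hcons, hrest, hcontains, hget]
      simp
    · have hb : (k == doc) = false := by simp [hd]
      have hcons : pvSumMatch ((k, v) :: d) doc = pvSumMatch d doc := by
        simp [pvSumMatch, hb]
      have hcontains : PySem.Dict.contains (PySem.Dict.mk (((k, v) :: d) : List (String × List (String × Int)))) doc
          = PySem.Dict.contains (PySem.Dict.mk d) doc := by
        simp [PySem.Dict.contains_mk, List.any_cons, hb]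
      have hget : PySem.Dict.getD (PySem.Dict.mk (((k, v) :: d) : List (String × List (String × Int)))) doc []
          = PySem.Dict.getD (PySem.Dict.mk d) doc [] := by
        simp [PySem.Dict.getD, PySem.Dict.get?_mk_cons, hb]
      rw [hcons, hcontains, hget, ih hnd]

theorem pv_foldl_filterMap {α β γ : Type} (l : List α) (f : α → Option β) (g : γ → β → γ) (init : γ) :
    (l.filterMap f).foldl g init
      = l.foldl (fun acc x => match f x with | none => acc | some b => g acc b) init := by
  induction l generalizing init with
  | nil => rfl
  | cons a l ih =>
    cases h : f a <;> simp [h, ih]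

theorem pv_totalA (tokens : List String) (index : List (String × List (String × List (String × Int)))) (doc : String) :
    pvTotalA tokens index doc
      = ((pvD tokens index).map (fun d =>
          if PySem.Dict.contains (PySem.Dict.mk d) doc then pvCount (PySem.Dict.getD (PySem.Dict.mk d) doc []) else 0)).sum := by
  have h1 : pvTotalA tokens index doc
      = (pvD tokens index).foldl (fun acc d =>
          if PySem.Dict.contains (PySem.Dict.mk d) doc then acc + pvCount (PySem.Dict.getD (PySem.Dict.mk d) doc []) else acc) 0 := by
    rw [pvTotalA, pvD, pv_foldl_filterMap]
    apply PySem.List.foldl_congr_mem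
    intro acc t _
    cases hg : PySem.Dict.get? (PySem.Dict.mk index) t <;> simp [hg]
  have h2 : (fun (acc : Int) (d : List (String × List (String × Int))) =>
        if PySem.Dict.contains (PySem.Dict.mk d) doc then acc + pvCount (PySem.Dict.getD (PySem.Dict.mk d) doc []) else acc)
      = (fun acc d => acc + (if PySem.Dict.contains (PySem.Dict.mk d) doc then pvCount (PySem.Dict.getD (PySem.Dict.mk d) doc []) else 0)) := by
    funext acc d
    split_ifs <;> simp
  rw [h1, h2, PySem.List.foldl_add]
  simp

theorem pv_len_iff (tokens : List String) (index : List (String × List (String × List (String × Int)))) (doc : String) :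
    PySem.Set.len (PySem.Set.ofList (tokens.filter (pvHas index doc)))
        = PySem.Set.len (PySem.Set.ofList (tokens.filter (fun t => PySem.Dict.contains (PySem.Dict.mk index) t)))
      ↔ ∀ t ∈ tokens, PySem.Dict.contains (PySem.Dict.mk index) t = true → pvHas index doc t = true := by
  have himp : ∀ t, pvHas index doc t = true → PySem.Dict.contains (PySem.Dict.mk index) t = true := by
    intro t ht
    rw [PySem.Dict.contains_eq_isSome_get?]
    cases hg : PySem.Dict.get? (PySem.Dict.mk index) t with
    | none => rw [pvHas, hg] at ht; exact absurd ht (by simp)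
    | some d => rfl
  have hsub : tokens.filter (pvHas index doc)
      = (tokens.filter (fun t => PySem.Dict.contains (PySem.Dict.mk index) t)).filter (pvHas index doc) := by
    rw [List.filter_filter]
    apply List.filter_congr
    intro t _
    cases hph : pvHas index doc t with
    | false => simp
    | true => simp [himp t hph]
  rw [hsub, pv_ofList_filter]
  constructor
  · intro h t ht hc
    have hlen : (List.filter (pvHas index doc) (PySem.Set.ofList (tokens.filter (fun t => PySem.Dict.contains (PySem.Dict.mk index) t)))).length
        = (PySem.Set.ofList (tokens.filter (fun t => PySem.Dict.contains (PySem.Dict.mk index) t))).length := by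
      simpa [PySem.Set.len, Nat.cast_inj] using h
    have hall := List.length_filter_eq_length_iff.mp hlen
    apply hall
    rw [PySem.Set.mem_ofList, List.mem_filter]
    exact ⟨ht, hc⟩
  · intro h
    have hall : ∀ a ∈ PySem.Set.ofList (tokens.filter (fun t => PySem.Dict.contains (PySem.Dict.mk index) t)), pvHas index doc a = true := by
      intro a ha
      rw [PySem.Set.mem_ofList, List.mem_filter] at ha
      exact h a ha.1 ha.2
    have hlen := List.length_filter_eq_length_iff.mpr hall
    simp only [PySem.Set.len]
    exact_mod_cast hlen

theorem pv_bridge (tokens : List String) (index : List (String × List (String × List (String × Int)))) (doc : String)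
    (d0 : List (String × List (String × Int))) (rest : List (List (String × List (String × Int))))
    (hD : pvD tokens index = d0 :: rest) (hdoc : doc ∈ (PySem.Dict.mk d0).keys) :
    (∀ t ∈ tokens, PySem.Dict.contains (PySem.Dict.mk index) t = true → pvHas index doc t = true)
      ↔ ∀ d ∈ rest, doc ∈ (PySem.Dict.mk d).keys := by
  constructor
  · intro h d hd
    have hdD : d ∈ pvD tokens index := by rw [hD]; exact List.mem_cons_of_mem _ hd
    obtain ⟨t, ht, hg⟩ := List.mem_filterMap.mp hdD
    have hc : PySem.Dict.contains (PySem.Dict.mk index) t = true := by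
      rw [PySem.Dict.contains_eq_isSome_get?, hg]; rfl
    have hh := h t ht hc
    rw [pvHas, hg] at hh
    obtain ⟨p, hp, hpe⟩ := List.any_eq_true.mp hh
    rw [PySem.Dict.keys_mk]
    exact List.mem_map.mpr ⟨p, hp, by simpa using hpe⟩
  · intro h t ht hc
    have hs : (PySem.Dict.get? (PySem.Dict.mk index) t).isSome := by
      rw [← PySem.Dict.contains_eq_isSome_get?]; exact hc
    obtain ⟨d, hg⟩ := Option.isSome_iff_exists.mp hs
    have hdD : d ∈ pvD tokens index := List.mem_filterMap.mpr ⟨t, ht, hg⟩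
    have hdk : doc ∈ (PySem.Dict.mk d).keys := by
      rw [hD] at hdD
      rcases List.mem_cons.mp hdD with h0 | hr
      · rw [h0]; exact hdoc
      · exact h d hr
    rw [pvHas, hg]
    rw [PySem.Dict.keys_mk] at hdk
    obtain ⟨p, hp, hpe⟩ := List.mem_map.mp hdk
    exact List.any_eq_true.mpr ⟨p, hp, by simp [hpe]⟩

-- ===== VERDICT (by name: the statement is the Claim_ definition above) =====
theorem filter_documents_spec : Claim_equal_filter_documents := by
  intro tokens index operator _hdom hpre
  obtain ⟨hguard, _hcrash⟩ := hpre
  show filter_documents tokens index operator = filter_documents_alt tokens index operator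
  have hndD : (PySem.Str.upper operator = "AND" ∨ PySem.Str.upper operator = "OR") →
      ∀ d ∈ pvD tokens index, ((PySem.Dict.mk d).keys).Nodup := by
    intro hop d hd
    obtain ⟨t, ht, hg⟩ := List.mem_filterMap.mp hd
    have h := (hguard hop).1 t ht
    rw [hg] at h
    simpa using h
  by_cases hOR : PySem.Str.upper operator = "OR"
  · simp only [filter_documents, filter_documents_alt]
    rw [if_pos hOR, if_neg (not_not_intro (Or.inr hOR)), if_pos hOR]
    rw [pv_split, pv_or_eq]
  · by_cases hAND : PySem.Str.upper operator = "AND"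
    · simp only [filter_documents, filter_documents_alt]
      rw [if_neg hOR, if_pos hAND, if_neg (not_not_intro (Or.inl hAND)), if_neg hOR]
      rw [pv_split]
      rw [show (tokens.filterMap (fun t =>
            (PySem.Dict.get? (PySem.Dict.mk index) t).map (fun d => PySem.Set.ofList (PySem.Dict.keys (PySem.Dict.mk d)))))
          = (pvD tokens index).map (fun d => PySem.Set.ofList (PySem.Dict.keys (PySem.Dict.mk d))) from by
        rw [pvD]
        exact (List.map_filterMap).symm]
      have hnodupC : (tokens.foldl (pvCStep index) PySem.Dict.empty).keys.Nodup := by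
        apply pv_nodup
        simp [PySem.Dict.empty]
      have hvals : ∀ doc, (tokens.foldl (pvCStep index) PySem.Dict.empty).getD doc 0 = pvTotalA tokens index doc := by
        intro doc
        rw [pv_getD, pv_totalA]
        simp only [PySem.Dict.getD_empty, zero_add]
        congr 1
        apply List.map_congr_left
        intro d hd
        exact pv_sumMatch_nodup d doc (hndD (Or.inl hAND) d hd)
      cases hD : pvD tokens index with
      | nil =>
        have hK : (tokens.foldl (pvCStep index) PySem.Dict.empty).keys = [] := by
          rw [pv_keys, hD]
          simp [PySem.Set.update, PySem.Dict.empty]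
        have hI : (tokens.foldl (pvCStep index) PySem.Dict.empty).items = [] := by
          have h2 : (tokens.foldl (pvCStep index) PySem.Dict.empty).items.map (fun x => x.1) = [] := hK
          exact List.map_eq_nil_iff.mp h2
        simp only [List.map_nil, hI, List.filter_nil]
      | cons d0 rest =>
        simp only [List.map_cons]
        have hk0 : ((PySem.Dict.mk d0).keys).Nodup := hndD (Or.inl hAND) d0 (by rw [hD]; exact List.mem_cons_self)
        rw [pv_common, pv_ofList_nodup _ hk0]
        rw [PySem.Dict.items_foldl_insert_fresh _ (fun doc => doc) (fun doc => pvTotalA tokens index doc) PySem.Dict.empty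
          (by intro a _; simp [PySem.Dict.empty, PySem.Dict.contains_mk])
          (by simpa using (hk0.filter _))]
        rw [PySem.Dict.items_eq_map_keys _ hnodupC 0, List.filter_map]
        have hKeys : (tokens.foldl (pvCStep index) PySem.Dict.empty).keys
            = PySem.Set.update ((PySem.Dict.mk d0).keys) (rest.flatMap (fun d => (PySem.Dict.mk d).keys)) := by
          rw [pv_keys, hD, List.flatMap_cons]
          show PySem.Set.update PySem.Dict.empty.keys _ = _
          rw [show (PySem.Dict.empty : PySem.Dict String Int).keys = [] from rfl]
          rw [PySem.Set.update, List.foldl_append]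
          rw [show List.foldl PySem.Set.add [] ((PySem.Dict.mk d0).keys) = PySem.Set.ofList ((PySem.Dict.mk d0).keys) from rfl]
          rw [pv_ofList_nodup _ hk0]
          rfl
        rw [hKeys]
        have hseenchar : ∀ doc, (tokens.foldl (pvSStep index) PySem.Dict.empty).getD doc PySem.Set.empty
            = PySem.Set.ofList (tokens.filter (pvHas index doc)) := by
          intro doc
          rw [pv_seen]
          rw [show (PySem.Dict.empty : PySem.Dict String (PySem.Set String)).getD doc PySem.Set.empty = PySem.Set.empty from rfl]
          rfl
        have hmem : ∀ x, ((fun doc =>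
              (PySem.Set.len ((tokens.foldl (pvSStep index) PySem.Dict.empty).getD doc PySem.Set.empty)
                == PySem.Set.len (PySem.Set.ofList (tokens.filter (fun t => PySem.Dict.contains (PySem.Dict.mk index) t))))) x) = true
            → x ∈ (PySem.Dict.mk d0).keys := by
          intro x hx
          simp only [hseenchar, beq_iff_eq] at hx
          have hall := (pv_len_iff tokens index x).mp hx
          obtain ⟨t0, ht0, hg0⟩ := List.mem_filterMap.mp (show d0 ∈ pvD tokens index from by
            rw [hD]; exact List.mem_cons_self)
          have hc0 : PySem.Dict.contains (PySem.Dict.mk index) t0 = true := by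
            rw [PySem.Dict.contains_eq_isSome_get?, hg0]; rfl
          have hh := hall t0 ht0 hc0
          rw [pvHas, hg0] at hh
          obtain ⟨p, hp, hpe⟩ := List.any_eq_true.mp hh
          rw [PySem.Dict.keys_mk]
          exact List.mem_map.mpr ⟨p, hp, by simpa using hpe⟩
        rw [show ((fun p => PySem.Set.len ((tokens.foldl (pvSStep index) PySem.Dict.empty).getD p.1 PySem.Set.empty)
              == PySem.Set.len (PySem.Set.ofList (tokens.filter (fun t => PySem.Dict.contains (PySem.Dict.mk index) t))))
            ∘ (fun k => (k, (tokens.foldl (pvCStep index) PySem.Dict.empty).getD k 0)))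
          = (fun doc => (PySem.Set.len ((tokens.foldl (pvSStep index) PySem.Dict.empty).getD doc PySem.Set.empty)
              == PySem.Set.len (PySem.Set.ofList (tokens.filter (fun t => PySem.Dict.contains (PySem.Dict.mk index) t))))) from by
          funext doc; rfl]
        rw [pv_update_filter _ _ _ hmem]
        have hfil : ((PySem.Dict.mk d0).keys).filter (fun doc =>
              (PySem.Set.len ((tokens.foldl (pvSStep index) PySem.Dict.empty).getD doc PySem.Set.empty)
                == PySem.Set.len (PySem.Set.ofList (tokens.filter (fun t => PySem.Dict.contains (PySem.Dict.mk index) t)))))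
            = ((PySem.Dict.mk d0).keys).filter (fun x =>
              (rest.map (fun d => PySem.Set.ofList (PySem.Dict.keys (PySem.Dict.mk d)))).all (fun t => PySem.Set.contains t x)) := by
          apply List.filter_congr
          intro doc hdoc
          rw [Bool.eq_iff_iff]
          constructor
          · intro hb
            simp only [hseenchar, beq_iff_eq] at hb
            have hall := (pv_len_iff tokens index doc).mp hb
            have hrest := (pv_bridge tokens index doc d0 rest hD hdoc).mp hall
            rw [List.all_eq_true]
            intro s hs
            obtain ⟨d, hd, hds⟩ := List.mem_map.mp hs
            rw [← hds]
            have hk := hrest d hd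
            have hmo : doc ∈ PySem.Set.ofList (PySem.Dict.keys (PySem.Dict.mk d)) :=
              (PySem.Set.mem_ofList _ _).mpr hk
            simpa [PySem.Set.contains] using hmo
          · intro hb
            simp only [hseenchar, beq_iff_eq]
            apply (pv_len_iff tokens index doc).mpr
            apply (pv_bridge tokens index doc d0 rest hD hdoc).mpr
            intro d hd
            rw [List.all_eq_true] at hb
            have hs := hb _ (List.mem_map_of_mem (f := fun d => PySem.Set.ofList (PySem.Dict.keys (PySem.Dict.mk d))) hd)
            have : doc ∈ PySem.Set.ofList (PySem.Dict.keys (PySem.Dict.mk d)) := by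
              simpa [PySem.Set.contains] using hs
            rwa [PySem.Set.mem_ofList] at this
        rw [hfil,
          show ((PySem.Dict.empty : PySem.Dict String Int)).items = ([] : List (String × Int)) from rfl,
          List.nil_append]
        apply List.map_congr_left
        intro doc _
        rw [hvals doc]
    · simp only [filter_documents, filter_documents_alt]
      rw [if_neg hOR, if_neg hAND,
        if_pos (show ¬(PySem.Str.upper operator = "AND" ∨ PySem.Str.upper operator = "OR") from by
          rintro (h | h)
          exacts [hAND h, hOR h])]
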